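-- pv_equiv track=rewrite | github.com/yutaOKKOTSU00/python-for-EveryOne | graph_theories/graph_propertises.py | Surjectivite
-- ===== SOURCE A (Python) =====
-- def Surjectivite(matrice, sommets):  #au moins un 1 par colonne
--     T=1
--
--     for i in range(sommets):
--         colone = 0
--         for j in range(sommets):
--             colone += matrice[j][i]
--         if colone < 1:
--             T = 0
--
--     return T
-- ===== SOURCE B (Python) =====
-- def Surjectivite(matrice, sommets):  # au moins un 1 par colonne
--     # Single row-major pass: maintain one running column-sum table instead of
--     # recomputing each column with an inner scan over all rows.
--     sums = [0] * sommets if sommets > 0 else []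
--     for j in range(sommets):
--         row = matrice[j]
--         sums = [s + x for s, x in zip(sums, row)]
--     return int(all(s >= 1 for s in sums))
-- ===== Notes on version B (the rewrite author's own statement) =====
-- stated objective: alternative
-- what changed: B replaces A's column-outer/row-inner rescans with a single row-major pass that maintains a running column-sum table (zip-add per row) and one final all() check, instead of recomputing each column sum and toggling a flag.
import Mathlib
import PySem

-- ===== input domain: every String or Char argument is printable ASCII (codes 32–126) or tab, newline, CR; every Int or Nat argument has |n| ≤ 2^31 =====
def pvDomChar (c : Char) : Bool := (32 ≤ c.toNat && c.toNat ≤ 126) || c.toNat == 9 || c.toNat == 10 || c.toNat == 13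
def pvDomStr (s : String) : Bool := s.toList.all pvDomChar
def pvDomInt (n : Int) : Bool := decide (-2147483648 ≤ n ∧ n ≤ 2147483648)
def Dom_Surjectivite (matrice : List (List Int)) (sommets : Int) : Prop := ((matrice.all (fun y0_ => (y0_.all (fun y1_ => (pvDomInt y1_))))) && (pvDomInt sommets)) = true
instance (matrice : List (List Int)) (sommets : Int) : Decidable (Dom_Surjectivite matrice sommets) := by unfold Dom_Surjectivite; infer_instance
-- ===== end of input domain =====

-- B makes a single row-major pass keeping a running column-sum table instead of A's
-- column-outer rescans; same asymptotic cost, different traversal and state (objective: alternative).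

-- ===== PORT A =====
def Surjectivite (matrice : List (List Int)) (sommets : Int) : Int :=
  (PySem.List.pyRange 0 sommets 1).foldl
    (fun T i =>
      let colone := (PySem.List.pyRange 0 sommets 1).foldl
        (fun c j => c + PySem.List.pyGetD (PySem.List.pyGetD matrice j ([] : List Int)) i 0) 0
      if colone < 1 then 0 else T) 1

-- ===== PORT B =====
def Surjectivite_alt (matrice : List (List Int)) (sommets : Int) : Int :=
  let sums := (PySem.List.pyRange 0 sommets 1).foldl
    (fun sums j =>
      let row := PySem.List.pyGetD matrice j ([] : List Int)
      (sums.zip row).map (fun p => p.1 + p.2))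
    (List.replicate sommets.toNat 0)
  if sums.all (fun s => 1 ≤ s) then 1 else 0

-- ===== PRECONDITION & SPEC =====
-- Pre_ excludes exactly the inputs where A raises IndexError: fewer than `sommets` rows,
-- or a row among the first `sommets` shorter than `sommets`.
def Pre_Surjectivite (matrice : List (List Int)) (sommets : Int) : Prop :=
  sommets ≤ (matrice.length : Int) ∧
  ∀ row ∈ matrice.take sommets.toNat, sommets ≤ (row.length : Int)
instance (matrice : List (List Int)) (sommets : Int) : Decidable (Pre_Surjectivite matrice sommets) := by unfold Pre_Surjectivite; infer_instance

def pvWitness_Surjectivite : List (List Int) × Int := ([[1, 0], [0, 1]], 2)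

def Spec_Surjectivite (matrice : List (List Int)) (sommets : Int) (out : Int) : Prop := out = Surjectivite_alt matrice sommets
instance (matrice : List (List Int)) (sommets : Int) (out : Int) : Decidable (Spec_Surjectivite matrice sommets out) := by unfold Spec_Surjectivite; infer_instance

-- ===== CLAIM (what is proved, stated in full; the proofs are below) =====
def Claim_equal_Surjectivite : Prop := ∀ (matrice : List (List Int)) (sommets : Int), Dom_Surjectivite matrice sommets → Pre_Surjectivite matrice sommets → Spec_Surjectivite matrice sommets (Surjectivite matrice sommets)

-- ===== LEMMAS AND PROOFS =====

-- A's flag loop: result is 0 iff some element of the list triggers the condition.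
theorem foldl_flag (L : List Int) (f : Int → Int) (init : Int) :
    L.foldl (fun T i => if f i < 1 then 0 else T) init
      = if L.any (fun i => decide (f i < 1)) then 0 else init := by
  induction L generalizing init with
  | nil => simp
  | cons x xs ih =>
    simp only [List.foldl_cons, List.any_cons, ih]
    by_cases h : f x < 1 <;> simp [h]

-- zip-add of a map over range with a long-enough row, elementwise.
theorem zip_add_map_range (n : ℕ) (g : ℕ → Int) (row : List Int) (h : n ≤ row.length) :
    (((List.range n).map g).zip row).map (fun p => p.1 + p.2)
      = (List.range n).map (fun k => g k + row.getD k 0) := by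
  apply List.ext_getElem
  · simp [Nat.min_eq_left h]
  · intro k hk _
    have hkn : k < n := by simpa [Nat.min_eq_left h] using hk
    have hkr : k < row.length := lt_of_lt_of_le hkn h
    simp [List.getElem_zip, List.getD_eq_getElem?_getD, List.getElem?_eq_getElem hkr]

-- B's row pass: starting from an indexed table, each zip-add adds the row's entry to every column slot.
theorem B_fold (matrice : List (List Int)) (n : ℕ) (js : List Int)
    (h : ∀ j ∈ js, n ≤ (PySem.List.pyGetD matrice j ([] : List Int)).length) (g : ℕ → Int) :
    js.foldl (fun sums j =>
        ((sums.zip (PySem.List.pyGetD matrice j ([] : List Int))).map (fun p => p.1 + p.2)))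
      ((List.range n).map g)
      = (List.range n).map (fun k =>
          g k + (js.map (fun j => (PySem.List.pyGetD matrice j ([] : List Int)).getD k 0)).sum) := by
  induction js generalizing g with
  | nil => simp
  | cons j js ih =>
    simp only [List.foldl_cons]
    rw [zip_add_map_range n g _ (h j (by simp)),
        ih (fun j' hj' => h j' (by simp [hj']))]
    apply List.map_congr_left
    intro k _
    simp [add_assoc]

theorem Surjectivite_spec : Claim_equal_Surjectivite := by
  intro matrice sommets _ hpre
  obtain ⟨hlen, hrows⟩ := hpre
  unfold Spec_Surjectivite Surjectivite Surjectivite_alt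
  have hrow : ∀ j ∈ PySem.List.pyRange 0 sommets 1,
      sommets.toNat ≤ (PySem.List.pyGetD matrice j ([] : List Int)).length := by
    intro j hj
    obtain ⟨hj0, hjs⟩ := (PySem.List.mem_pyRange_one).1 hj
    have hjl : j < (matrice.length : Int) := lt_of_lt_of_le hjs hlen
    rw [PySem.List.pyGetD_eq_getElem matrice ([] : List Int) hj0 hjl]
    have hlt : j.toNat < (matrice.take sommets.toNat).length := by
      simp only [List.length_take]
      exact lt_min (by omega) (by omega)
    have hmem : matrice[j.toNat] ∈ matrice.take sommets.toNat := by
      have : (matrice.take sommets.toNat)[j.toNat] = matrice[j.toNat] := List.getElem_take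
      rw [← this]
      exact List.getElem_mem _
    have := hrows _ hmem
    omega
  rw [show (List.replicate sommets.toNat (0 : Int)) = (List.range sommets.toNat).map (fun _ => (0 : Int)) by
    simp [List.map_const']]
  rw [B_fold matrice sommets.toNat _ hrow]
  simp only [PySem.List.foldl_add, zero_add]
  rw [foldl_flag]
  -- the inner column sum of A at a nonnegative index i equals B's column sum at i.toNat
  have hS : ∀ i : Int, 0 ≤ i →
      ((PySem.List.pyRange 0 sommets 1).map
        (fun j => PySem.List.pyGetD (PySem.List.pyGetD matrice j ([] : List Int)) i 0)).sum
      = ((PySem.List.pyRange 0 sommets 1).map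
        (fun j => (PySem.List.pyGetD matrice j ([] : List Int)).getD i.toNat 0)).sum := by
    intro i hi
    congr 1
    exact List.map_congr_left (fun j _ => by
      rw [PySem.List.pyGetD_of_nonneg _ _ hi])
  by_cases h : ∃ k ∈ List.range sommets.toNat,
      ((PySem.List.pyRange 0 sommets 1).map
        (fun j => (PySem.List.pyGetD matrice j ([] : List Int)).getD k 0)).sum < 1
  · obtain ⟨k, hk, hlt⟩ := h
    have hkn : (k : Int) < sommets := by
      have := List.mem_range.1 hk; omega
    rw [if_pos, if_neg]
    · simp only [List.all_eq_true, List.mem_map, List.mem_range, decide_eq_true_eq]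
      push Not
      exact ⟨_, ⟨k, List.mem_range.1 hk, rfl⟩, by omega⟩
    · simp only [List.any_eq_true, decide_eq_true_eq]
      refine ⟨(k : Int), (PySem.List.mem_pyRange_one).2 ⟨by omega, hkn⟩, ?_⟩
      rw [hS _ (by omega)]
      simpa using hlt
  · push Not at h
    rw [if_neg, if_pos]
    · simp only [List.all_eq_true, List.mem_map, List.mem_range, decide_eq_true_eq]
      rintro s ⟨k, hk, rfl⟩
      exact h k (List.mem_range.2 hk)
    · simp only [List.any_eq_true, decide_eq_true_eq, not_exists, not_and, not_lt]
      intro i hi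
      obtain ⟨hi0, his⟩ := (PySem.List.mem_pyRange_one).1 hi
      rw [hS _ hi0]
      exact h i.toNat (List.mem_range.2 (by omega))
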